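-- pv_equiv track=rewrite | github.com/iAmMeteros/pfrUtils-Python | Requester/main.py | formatSnils
-- ===== SOURCE A (Python) =====
-- def formatSnils(snils):
--     if len(snils) > 0:
--         if not snils[-1].isnumeric():
--             snils = snils[:-1]
--         newsnils = ""
--         snils = ''.join(snils.split('-'))
--         for char in snils:
--             newsnils += char
--             if len(newsnils) == 4 or len(newsnils) == 8 or len(newsnils) == 12:
--                 newsnils = newsnils[:-1] + '-' + newsnils[-1]
--         snils = newsnils
--         if len(snils) > 14:
--             snils = snils[:-1]
--     return snils
-- ===== SOURCE B (Python) =====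
-- def formatSnils(snils):
--     # B: fixed-slice grouping instead of A's growing-accumulator loop.
--     if not snils:
--         return snils
--     s = snils[:-1] if not snils[-1].isdigit() else snils
--     digits = s.replace('-', '')
--     parts = [p for p in (digits[0:3], digits[3:6], digits[6:9], digits[9:]) if p]
--     out = '-'.join(parts)
--     return out[:-1] if len(out) > 14 else out
-- ===== Notes on version B (the rewrite author's own statement) =====
-- stated objective: simpler
-- what changed: Replaces A's growing-accumulator character loop (which re-inserts a dash whenever the accumulator length hits 4, 8 or 12) by slicing the dash-free string into the fixed groups [0:3],[3:6],[6:9],[9:] and joining the non-empty groups with dashes; this also avoids quadratic repeated string concatenation.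
import Mathlib
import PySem

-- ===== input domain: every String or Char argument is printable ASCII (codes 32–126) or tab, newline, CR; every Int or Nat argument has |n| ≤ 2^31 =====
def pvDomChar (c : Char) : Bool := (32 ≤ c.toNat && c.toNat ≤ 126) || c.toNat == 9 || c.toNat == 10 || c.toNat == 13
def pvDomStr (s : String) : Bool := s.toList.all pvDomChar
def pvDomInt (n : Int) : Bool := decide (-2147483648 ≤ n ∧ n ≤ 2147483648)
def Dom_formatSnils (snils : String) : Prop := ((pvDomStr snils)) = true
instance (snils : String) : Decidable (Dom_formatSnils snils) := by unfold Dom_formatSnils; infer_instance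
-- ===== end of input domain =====

-- B replaces A's growing-accumulator character loop by fixed-slice grouping ('-'.join of the
-- three-character slices); same return value, simpler decomposition.

-- ===== PORT A =====
-- the body of A's 'for char in snils' loop, acting on the accumulator 'newsnils'
def snilsStep (newsnils : List Char) (c : Char) : List Char :=
  let ns := newsnils ++ [c]
  if ns.length = 4 ∨ ns.length = 8 ∨ ns.length = 12 then
    -- newsnils = newsnils[:-1] + '-' + newsnils[-1]  (ns is nonempty, so pyGet? is some)
    match PySem.List.pyGet? ns (-1) with
    | some last => PySem.List.slice ns none (some (-1)) ++ '-' :: [last]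
    | none => ns
  else ns

def formatSnils (snils : String) : String :=
  if PySem.Str.len snils > 0 then
    let cs := snils.toList
    -- 'if not snils[-1].isnumeric()': on the ASCII domain isnumeric coincides with isdigit
    let cs1 := match PySem.List.pyGet? cs (-1) with
      | some last => if ! PySem.Chars.isdigit last then PySem.List.slice cs none (some (-1)) else cs
      | none => cs
    -- snils = ''.join(snils.split('-'))
    let cs2 := PySem.Chars.join [] (PySem.Chars.splitOn cs1 ['-'])
    let ns := cs2.foldl snilsStep []
    String.ofList (if ns.length > 14 then PySem.List.slice ns none (some (-1)) else ns)
  else snils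

-- ===== PORT B =====
def formatSnils_alt (snils : String) : String :=
  match snils.toList.getLast? with
  | none => snils   -- 'if not snils: return snils'
  | some last =>
    -- on the ASCII domain isnumeric coincides with isdigit
    let s := if PySem.Chars.isdigit last then snils.toList else snils.toList.dropLast
    let ds := PySem.Chars.replace s ['-'] []
    let parts := [PySem.List.slice ds (some 0) (some 3), PySem.List.slice ds (some 3) (some 6),
                  PySem.List.slice ds (some 6) (some 9), PySem.List.slice ds (some 9) none].filter (· ≠ [])
    let out := PySem.Chars.join ['-'] parts
    String.ofList (if out.length > 14 then out.dropLast else out)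

-- ===== PRECONDITION & SPEC =====
def Spec_formatSnils (snils : String) (out : String) : Prop := out = formatSnils_alt snils
instance (snils : String) (out : String) : Decidable (Spec_formatSnils snils out) := by unfold Spec_formatSnils; infer_instance

-- ===== CLAIM (what is proved, stated in full; the proofs are below) =====
def Claim_equal_formatSnils : Prop := ∀ (snils : String), Dom_formatSnils snils → Spec_formatSnils snils (formatSnils snils)

-- ===== LEMMAS AND PROOFS =====

-- s.replace('-', '') removes exactly the dashes
theorem replaceGo (fuel : Nat) : ∀ (l acc : List Char), l.length ≤ fuel →
    PySem.Chars.replace.go ['-'] [] fuel l acc = acc.reverse ++ l.filter (· ≠ '-') := by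
  induction fuel with
  | zero => intro l acc h; simp at h; subst h; simp [PySem.Chars.replace.go]
  | succ n ih =>
    intro l acc h
    match l with
    | [] => simp [PySem.Chars.replace.go]
    | c :: t =>
      by_cases hc : c = '-'
      · subst hc; simp [PySem.Chars.replace.go, ih t acc (by simpa using h)]
      · simp [PySem.Chars.replace.go, hc, ih t (c :: acc) (by simpa using h), Ne.symm hc]

theorem replace_filter (cs : List Char) :
    PySem.Chars.replace cs ['-'] [] = cs.filter (· ≠ '-') := by
  simpa [PySem.Chars.replace] using replaceGo cs.length cs [] le_rfl

-- ''.join(s.split('-')) removes exactly the dashes as well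
theorem splitGo (fuel : Nat) : ∀ (l cur : List Char) (accs : List (List Char)), l.length ≤ fuel →
    (PySem.Chars.splitOn.go ['-'] fuel l cur accs).flatten =
      accs.reverse.flatten ++ cur.reverse ++ l.filter (· ≠ '-') := by
  induction fuel with
  | zero => intro l cur accs h; simp at h; subst h; simp [PySem.Chars.splitOn.go]
  | succ n ih =>
    intro l cur accs h
    match l with
    | [] => simp [PySem.Chars.splitOn.go]
    | c :: t =>
      by_cases hc : c = '-'
      · subst hc; simp [PySem.Chars.splitOn.go, ih t [] (cur.reverse :: accs) (by simpa using h)]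
      · simp [PySem.Chars.splitOn.go, hc, ih t (c :: cur) accs (by simpa using h), Ne.symm hc]

theorem intersperse_nil_flatten (xs : List (List Char)) :
    (List.intersperse ([] : List Char) xs).flatten = xs.flatten := by
  induction xs with
  | nil => simp
  | cons a t ih =>
    cases t with
    | nil => simp
    | cons b u => simp_all [List.intersperse]

theorem join_split (cs : List Char) :
    PySem.Chars.join [] (PySem.Chars.splitOn cs ['-']) = cs.filter (· ≠ '-') := by
  simpa [PySem.Chars.join, List.intercalate, intersperse_nil_flatten, PySem.Chars.splitOn]
    using splitGo (cs.length + 1) cs [] [] (by omega)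

-- the common normal form of both programs: the dash-free characters in groups of 3,3,3,rest
def fmt (ds : List Char) : List Char :=
  if ds.length ≤ 3 then ds
  else if ds.length ≤ 6 then ds.take 3 ++ '-' :: ds.drop 3
  else if ds.length ≤ 9 then ds.take 3 ++ '-' :: ((ds.drop 3).take 3 ++ '-' :: ds.drop 6)
  else ds.take 3 ++ '-' :: ((ds.drop 3).take 3 ++ '-' :: ((ds.drop 6).take 3 ++ '-' :: ds.drop 9))

theorem fmt_length (ds : List Char) : (fmt ds).length =
    if ds.length ≤ 3 then ds.length else if ds.length ≤ 6 then ds.length + 1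
    else if ds.length ≤ 9 then ds.length + 2 else ds.length + 3 := by
  unfold fmt; split_ifs <;> simp <;> omega

theorem step_concat (acc : List Char) (c : Char) :
    snilsStep acc c = if acc.length + 1 = 4 ∨ acc.length + 1 = 8 ∨ acc.length + 1 = 12
      then acc ++ ['-', c] else acc ++ [c] := by
  unfold snilsStep
  simp [PySem.List.pyGet?_neg_one, PySem.List.slice_to_neg_one]

theorem step_fmt (l : List Char) (c : Char) : snilsStep (fmt l) c = fmt (l ++ [c]) := by
  rw [step_concat]
  have hlen : (fmt l).length = (if l.length ≤ 3 then l.length else if l.length ≤ 6 then l.length + 1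
      else if l.length ≤ 9 then l.length + 2 else l.length + 3) := fmt_length l
  have hta : 3 ≤ l.length → (l ++ [c]).take 3 = l.take 3 := fun h =>
    List.take_append_of_le_length h
  have hda3 : 3 ≤ l.length → (l ++ [c]).drop 3 = l.drop 3 ++ [c] := fun h =>
    List.drop_append_of_le_length h
  have hda6 : 6 ≤ l.length → (l ++ [c]).drop 6 = l.drop 6 ++ [c] := fun h =>
    List.drop_append_of_le_length h
  have hda9 : 9 ≤ l.length → (l ++ [c]).drop 9 = l.drop 9 ++ [c] := fun h =>
    List.drop_append_of_le_length h
  have hts3 : 6 ≤ l.length → (l.drop 3 ++ [c]).take 3 = (l.drop 3).take 3 := fun h =>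
    List.take_append_of_le_length (by simp; omega)
  have hts6 : 9 ≤ l.length → (l.drop 6 ++ [c]).take 3 = (l.drop 6).take 3 := fun h =>
    List.take_append_of_le_length (by simp; omega)
  rcases Nat.lt_or_ge l.length 3 with h | h3
  · rw [if_neg (by split_ifs at hlen <;> omega)]
    unfold fmt
    rw [if_pos (by omega), if_pos (by simp; omega)]
  rcases Nat.lt_or_ge l.length 4 with h | h4
  · -- length exactly 3: dash inserted
    have t1 : l.take 3 = l := List.take_of_length_le (by omega)
    have d1 : l.drop 3 = [] := List.drop_eq_nil_of_le (by omega)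
    rw [if_pos (by split_ifs at hlen <;> omega)]
    unfold fmt
    rw [if_pos (by omega), if_neg (by simp; omega), if_pos (by simp; omega),
      hta (by omega), hda3 (by omega), t1, d1]
    simp
  rcases Nat.lt_or_ge l.length 6 with h | h6
  · -- 4 ≤ n ≤ 5
    rw [if_neg (by split_ifs at hlen <;> omega)]
    unfold fmt
    rw [if_neg (by omega), if_pos (by omega), if_neg (by simp; omega), if_pos (by simp; omega),
      hta (by omega), hda3 (by omega)]
    simp
  rcases Nat.lt_or_ge l.length 7 with h | h7
  · -- length exactly 6: dash inserted
    have t1 : (l.drop 3).take 3 = l.drop 3 := List.take_of_length_le (by simp; omega)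
    have d1 : l.drop 6 = [] := List.drop_eq_nil_of_le (by omega)
    rw [if_pos (by split_ifs at hlen <;> omega)]
    unfold fmt
    rw [if_neg (by omega), if_pos (by omega), if_neg (by simp; omega), if_neg (by simp; omega),
      if_pos (by simp; omega), hta (by omega), hda3 (by omega), hda6 (by omega),
      hts3 (by omega), t1, d1]
    simp
  rcases Nat.lt_or_ge l.length 9 with h | h9
  · -- 7 ≤ n ≤ 8
    rw [if_neg (by split_ifs at hlen <;> omega)]
    unfold fmt
    rw [if_neg (by omega), if_neg (by omega), if_pos (by omega), if_neg (by simp; omega),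
      if_neg (by simp; omega), if_pos (by simp; omega), hta (by omega), hda3 (by omega),
      hda6 (by omega), hts3 (by omega)]
    simp
  rcases Nat.lt_or_ge l.length 10 with h | h10
  · -- length exactly 9: dash inserted
    have t1 : (l.drop 6).take 3 = l.drop 6 := List.take_of_length_le (by simp; omega)
    have d1 : l.drop 9 = [] := List.drop_eq_nil_of_le (by omega)
    rw [if_pos (by split_ifs at hlen <;> omega)]
    unfold fmt
    rw [if_neg (by omega), if_neg (by omega), if_pos (by omega), if_neg (by simp; omega),
      if_neg (by simp; omega), if_neg (by simp; omega), hta (by omega), hda3 (by omega),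
      hda6 (by omega), hda9 (by omega), hts3 (by omega), hts6 (by omega), t1, d1]
    simp
  · -- n ≥ 10: no more dashes ever
    rw [if_neg (by split_ifs at hlen <;> omega)]
    unfold fmt
    rw [if_neg (by omega), if_neg (by omega), if_neg (by omega), if_neg (by simp; omega),
      if_neg (by simp; omega), if_neg (by simp; omega), hta (by omega), hda3 (by omega),
      hda6 (by omega), hda9 (by omega), hts3 (by omega), hts6 (by omega)]
    simp

-- A's loop computes the grouped normal form
theorem fold_fmt (ds : List Char) : ds.foldl snilsStep [] = fmt ds := by
  induction ds using List.reverseRecOn with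
  | nil => simp [fmt]
  | append_singleton l c ih => rw [List.foldl_append, List.foldl_cons, List.foldl_nil, ih, step_fmt]

-- B's slice grouping computes the grouped normal form
theorem parts_fmt (ds : List Char) :
    PySem.Chars.join ['-'] ([ds.take 3, (ds.drop 3).take 3, (ds.drop 6).take 3, ds.drop 9].filter (· ≠ [])) = fmt ds := by
  have hjoin : ∀ (l : List (List Char)), PySem.Chars.join ['-'] l = List.intercalate ['-'] l := fun _ => rfl
  rcases Nat.lt_or_ge 0 ds.length with h0 | h0'
  case inr =>
    have : ds = [] := by cases ds <;> simp_all
    subst this; simp [fmt, PySem.Chars.join, List.intercalate]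
  rcases Nat.lt_or_ge 3 ds.length with h3 | h3'
  case inr =>
    have e1 : ds.take 3 = ds := List.take_of_length_le h3'
    have e2 : ds.drop 3 = [] := List.drop_eq_nil_of_le h3'
    have e3 : ds.drop 6 = [] := List.drop_eq_nil_of_le (by omega)
    have e4 : ds.drop 9 = [] := List.drop_eq_nil_of_le (by omega)
    have hne : ds ≠ [] := by cases ds <;> simp_all
    rw [e1, e2, e3, e4]
    simp [hne, hjoin, List.intercalate, fmt, h3']
  rcases Nat.lt_or_ge 6 ds.length with h6 | h6'
  case inr =>
    have e2 : (ds.drop 3).take 3 = ds.drop 3 := List.take_of_length_le (by simp; omega)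
    have e3 : ds.drop 6 = [] := List.drop_eq_nil_of_le (by omega)
    have e4 : ds.drop 9 = [] := List.drop_eq_nil_of_le (by omega)
    have hne1 : ds.take 3 ≠ [] := List.ne_nil_of_length_pos (by simp; omega)
    have hne2 : ds.drop 3 ≠ [] := List.ne_nil_of_length_pos (by simp; omega)
    rw [e2, e3, e4]
    simp [hne1, hne2, hjoin, List.intercalate, List.intersperse, fmt, show ¬ ds.length ≤ 3 by omega, h6']
  rcases Nat.lt_or_ge 9 ds.length with h9 | h9'
  case inr =>
    have e3 : (ds.drop 6).take 3 = ds.drop 6 := List.take_of_length_le (by simp; omega)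
    have e4 : ds.drop 9 = [] := List.drop_eq_nil_of_le (by omega)
    have hne1 : ds.take 3 ≠ [] := List.ne_nil_of_length_pos (by simp; omega)
    have hne2 : (ds.drop 3).take 3 ≠ [] := List.ne_nil_of_length_pos (by simp; omega)
    have hne3 : ds.drop 6 ≠ [] := List.ne_nil_of_length_pos (by simp; omega)
    rw [e3, e4]
    simp [hne1, hne2, hne3, hjoin, List.intercalate, List.intersperse, fmt,
      show ¬ ds.length ≤ 3 by omega, show ¬ ds.length ≤ 6 by omega, h9']
  · have hne1 : ds.take 3 ≠ [] := List.ne_nil_of_length_pos (by simp; omega)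
    have hne2 : (ds.drop 3).take 3 ≠ [] := List.ne_nil_of_length_pos (by simp; omega)
    have hne3 : (ds.drop 6).take 3 ≠ [] := List.ne_nil_of_length_pos (by simp; omega)
    have hne4 : ds.drop 9 ≠ [] := List.ne_nil_of_length_pos (by simp; omega)
    simp [hne1, hne2, hne3, hne4, hjoin, List.intercalate, List.intersperse, fmt,
      show ¬ ds.length ≤ 3 by omega, show ¬ ds.length ≤ 6 by omega, show ¬ ds.length ≤ 9 by omega]

-- B's slices written as take/drop
theorem slice03 (ds : List Char) : PySem.List.slice ds (some 0) (some 3) = ds.take 3 := by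
  simp [PySem.List.slice_zero_start]
  exact PySem.List.slice_to_natCast (b := 3) ds
theorem slice36 (ds : List Char) : PySem.List.slice ds (some 3) (some 6) = (ds.drop 3).take 3 := by
  have := PySem.List.slice_natCast (a := 3) (b := 6) ds
  norm_num at this; exact this
theorem slice69 (ds : List Char) : PySem.List.slice ds (some 6) (some 9) = (ds.drop 6).take 3 := by
  have := PySem.List.slice_natCast (a := 6) (b := 9) ds
  norm_num at this; exact this
theorem slice9 (ds : List Char) : PySem.List.slice ds (some 9) none = ds.drop 9 := by
  have := PySem.List.slice_from_natCast (a := 9) ds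
  norm_num at this; exact this

-- ===== VERDICT (by name: the statement is the Claim_ definition above) =====
theorem formatSnils_spec : Claim_equal_formatSnils := by
  unfold Claim_equal_formatSnils Spec_formatSnils
  intro snils _
  unfold formatSnils formatSnils_alt
  dsimp only
  cases hlast : snils.toList.getLast? with
  | none =>
    have h0 : snils.toList = [] := by
      cases h : snils.toList with
      | nil => rfl
      | cons a t => rw [h] at hlast; simp at hlast
    simp [PySem.Str.len_eq, h0]
  | some l0 =>
    have hne : snils.toList ≠ [] := by
      intro h; rw [h] at hlast; simp at hlast
    have hlen : 0 < snils.toList.length := List.length_pos_of_ne_nil hne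
    rw [if_pos (by simpa [PySem.Str.len_eq] using hlen)]
    rw [PySem.List.pyGet?_neg_one, hlast]
    simp only [PySem.List.slice_to_neg_one, join_split, replace_filter, fold_fmt,
      slice03, slice36, slice69, slice9, parts_fmt]
    by_cases hd : PySem.Chars.isdigit l0
    · simp [hd]
    · simp [hd]
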